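/- GENERATED by c/gen_decode.py: decode facts of the image, one per distinct instruction byte string. -/
import UserX.DecodeImage

#decode_all Vorbis.Dec
  "01d8"  -- add eax,ebx
  "0f833b070000"  -- jae 11682e
  "0f84ca000000"  -- je 1144ab
  "0f8662010000"  -- jbe 102a9b
  "0f8e89000000"  -- jle 1158e0
  "0fb64c0331"  -- movzx ecx,BYTE PTR [rbx+rax*1+0x31]
  "29f0"  -- sub eax,esi
  "40f6c701"  -- test dil,0x1
  "4129f7"  -- sub r15d,esi
  "4183ee01"  -- sub r14d,0x1
  "4189ef"  -- mov r15d,ebp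
  "41be00000000"  -- mov r14d,0x0
  "4283bca40007000000"  -- cmp DWORD PTR [rsp+r12*4+0x700],0x0
  "442bab80000000"  -- sub r13d,DWORD PTR [rbx+0x80]
  "44894c241c"  -- mov DWORD PTR [rsp+0x1c],r9d
  "4489bd94000000"  -- mov DWORD PTR [rbp+0x94],r15d
  "448b7500"  -- mov r14d,DWORD PTR [rbp+0x0]
  "450fb6741f01"  -- movzx r14d,BYTE PTR [r15+rbx*1+0x1]
  "4589c8"  -- mov r8d,r9d
  "46887c3331"  -- mov BYTE PTR [rbx+r14*1+0x31],r15b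
  "48632c24"  -- movsxd rbp,DWORD PTR [rsp]
  "4881c488000000"  -- add rsp,0x88
  "4883ee04"  -- sub rsi,0x4
  "48899d50ffffff"  -- mov QWORD PTR [rbp-0xb0],rbx
  "488b4dc0"  -- mov rcx,QWORD PTR [rbp-0x40]
  "488bb560ffffff"  -- mov rsi,QWORD PTR [rbp-0xa0]
  "488d6f04"  -- lea rbp,[rdi+0x4]
  "488d7d64"  -- lea rdi,[rbp+0x64]
  "488dbba8050000"  -- lea rdi,[rbx+0x5a8]
  "488dbdd8010000"  -- lea rdi,[rbp+0x1d8]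
  "48c7442458000e1200"  -- mov QWORD PTR [rsp+0x58],0x120e00
  "4929ef"  -- sub r15,rbp
  "4989ce"  -- mov r14,rcx
  "498d7c2414"  -- lea rdi,[r12+0x14]
  "498dbde4060000"  -- lea rdi,[r13+0x6e4]
  "4a8d7c2321"  -- lea rdi,[rbx+r12*1+0x21]
  "4c037d28"  -- add r15,QWORD PTR [rbp+0x28]
  "4c89ad38010000"  -- mov QWORD PTR [rbp+0x138],r13
  "4c8b7598"  -- mov r14,QWORD PTR [rbp-0x68]
  "4c8dac0250070000"  -- lea r13,[rdx+rax*1+0x750]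
  "4d89f7"  -- mov r15,r14
  "5b"  -- pop rbx
  "66410f6ece"  -- movd xmm1,r14d
  "66480f6ec7"  -- movq xmm0,rdi
  "7413"  -- je 10dc2d
  "74d0"  -- je 1015fe
  "768c"  -- jbe 1116d2
  "7d76"  -- jge 103640
  "7f9b"  -- jg 10b2bf
  "8344244801"  -- add DWORD PTR [rsp+0x48],0x1
  "84c9"  -- test cl,cl
  "896b10"  -- mov DWORD PTR [rbx+0x10],ebp
  "89d9"  -- mov ecx,ebx
  "8b4da8"  -- mov ecx,DWORD PTR [rbp-0x58]
  "8b859c000000"  -- mov eax,DWORD PTR [rbp+0x9c]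
  "a807"  -- test al,0x7
  "c1e318"  -- shl ebx,0x18
  "c7803800c000f2f2f2f2"  -- mov DWORD PTR [rax+0xc00038],0xf2f2f2f2
  "d1fd"  -- sar ebp,1
  "e8088f0000"  -- call 10c560
  "e81270feff"  -- call 100b40
  "e81bffffff"  -- call 10d040
  "e825f2feff"  -- call 103d00
  "e82eebfeff"  -- call 100720
  "e838ffffff"  -- call 10d1c0
  "e844a2feff"  -- call 1008e0
  "e84dfafeff"  -- call 100640
  "e85972ffff"  -- call 100640
  "e867f5feff"  -- call 109080
  "e87216ffff"  -- call 100640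
  "e87d2affff"  -- call 100800
  "e88837ffff"  -- call 107060
  "e892b6feff"  -- call 1008e0
  "e89c51ffff"  -- call 100640
  "e8a731ffff"  -- call 100640
  "e8b110ffff"  -- call 100640
  "e8baf8feff"  -- call 100640
  "e8c5640100"  -- call 119a40
  "e8ce27ffff"  -- call 100720
  "e8d994ffff"  -- call 101440
  "e8e2b9feff"  -- call 100640
  "e8ec17ffff"  -- call 100800
  "e8f5a2ffff"  -- call 101820
  "e902fbffff"  -- jmp 113b22
  "e943ffffff"  -- jmp 10f06d
  "e996f1ffff"  -- jmp 113b22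
  "e9e9f6ffff"  -- jmp 113b22
  "eb5a"  -- jmp 112e43
  "ebd8"  -- jmp 104f12
  "f20f580593d70100"  -- addsd xmm0,QWORD PTR [rip+0x1d793]
  "f20f5ce3"  -- subsd xmm4,xmm3
  "f30f104c2414"  -- movss xmm1,DWORD PTR [rsp+0x14]
  "f30f107308"  -- movss xmm6,DWORD PTR [rbx+0x8]
  "f30f114de4"  -- movss DWORD PTR [rbp-0x1c],xmm1
  "f30f11742404"  -- movss DWORD PTR [rsp+0x4],xmm6
  "f30f58c5"  -- addss xmm0,xmm5
  "f30f59cf"  -- mulss xmm1,xmm7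
  "f30f6f4500"  -- movdqu xmm0,XMMWORD PTR [rbp+0x0]
  "f3410f117d0c"  -- movss DWORD PTR [r13+0xc],xmm7
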